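-- pv_equiv track=rewrite | github.com/andy-landy/traceback_with_variables | traceback_with_variables/fast_capped_str_casts.py | tokens_to_big_tokens
-- ===== SOURCE A (Python) =====
-- from typing import List, Iterator, Iterable, Any, Type
--
-- def tokens_to_big_tokens(tokens: List[str], str_len_cap: int, reverse: bool) -> Iterator[str]:
--     if str_len_cap < 0 or str_len_cap >= sum(len(token) for token in tokens):
--         yield ''.join(reversed(tokens) if reverse else tokens)
--         return
--
--     sum_token_len = 0
--     for num_full_tokens, token in enumerate(tokens):
--         if sum_token_len + len(token) > str_len_cap:
--             break
--         sum_token_len += len(token)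
--
--     if reverse:
--         yield token[sum_token_len - str_len_cap:] if sum_token_len < str_len_cap else ''
--         yield ''.join(reversed(tokens[:num_full_tokens]))
--     else:
--         yield ''.join(tokens[:num_full_tokens])
--         yield token[:str_len_cap - sum_token_len]
-- ===== SOURCE B (Python) =====
-- from itertools import accumulate
-- from bisect import bisect_right
--
--
-- def tokens_to_big_tokens(tokens, str_len_cap, reverse):
--     total = sum(map(len, tokens))
--     if str_len_cap < 0 or str_len_cap >= total:
--         yield ''.join(reversed(tokens) if reverse else tokens)
--         return
--
--     prefix = list(accumulate(map(len, tokens)))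
--     k = bisect_right(prefix, str_len_cap)          # number of whole tokens that fit
--     full_len = prefix[k - 1] if k else 0
--     rem = str_len_cap - full_len                   # chars taken from the boundary token
--     tok = tokens[k]                                # k < len(tokens) since str_len_cap < total
--
--     if reverse:
--         yield tok[len(tok) - rem:]
--         yield ''.join(reversed(tokens[:k]))
--     else:
--         yield ''.join(tokens[:k])
--         yield tok[:rem]
-- ===== Notes on version B (the rewrite author's own statement) =====
-- stated objective: alternative
-- what changed: Replaced A's accumulating for-loop with break by a prefix-sum table (itertools.accumulate) plus a bisect_right lookup that yields the number of whole tokens that fit, from which the boundary token and remaining character budget are read off directly.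
import Mathlib
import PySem

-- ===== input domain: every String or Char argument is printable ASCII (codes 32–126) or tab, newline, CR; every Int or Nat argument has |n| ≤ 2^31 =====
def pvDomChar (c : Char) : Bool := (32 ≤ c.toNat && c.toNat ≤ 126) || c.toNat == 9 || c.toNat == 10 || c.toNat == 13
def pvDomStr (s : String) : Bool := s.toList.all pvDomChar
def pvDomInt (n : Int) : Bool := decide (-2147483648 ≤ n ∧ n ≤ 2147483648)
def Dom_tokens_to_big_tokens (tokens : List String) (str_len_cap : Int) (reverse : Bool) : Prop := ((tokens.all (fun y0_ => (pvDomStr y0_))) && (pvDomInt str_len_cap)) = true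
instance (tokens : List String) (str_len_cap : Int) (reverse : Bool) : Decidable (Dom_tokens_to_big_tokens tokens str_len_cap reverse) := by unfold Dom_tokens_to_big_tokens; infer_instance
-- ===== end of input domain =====

-- B replaces A's accumulating for-loop+break with a prefix-sum table and a bisect_right
-- lookup (objective: alternative decomposition, same asymptotic cost).
-- Both Pythons are generators; we compare the list of yielded strings.

-- ===== PORT A =====
-- A's for-loop over enumerate(tokens) with break; state (num_full_tokens, token, sum_token_len).
-- The [] case is unreachable under A's guard (str_len_cap < total length ⇒ the break fires).
def pvALoop (cap : Int) : List String → Nat → Int → Nat × String × Int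
  | [], i, s => (i, "", s)
  | t :: rest, i, s =>
    if s + PySem.Str.len t > cap then (i, t, s)
    else pvALoop cap rest (i + 1) (s + PySem.Str.len t)

def tokens_to_big_tokens (tokens : List String) (str_len_cap : Int) (reverse : Bool) : List String :=
  if str_len_cap < 0 ∨ str_len_cap ≥ tokens.foldl (fun a t => a + PySem.Str.len t) 0 then
    [PySem.Str.join "" (if reverse then tokens.reverse else tokens)]
  else
    match pvALoop str_len_cap tokens 0 0 with
    | (num_full_tokens, token, sum_token_len) =>
      if reverse then
        [ (if sum_token_len < str_len_cap then
             PySem.Str.slice token (some (sum_token_len - str_len_cap)) none else ""),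
          PySem.Str.join "" ((tokens.take num_full_tokens).reverse) ]
      else
        [ PySem.Str.join "" (tokens.take num_full_tokens),
          PySem.Str.slice token none (some (str_len_cap - sum_token_len)) ]

-- ===== PORT B =====
-- itertools.accumulate of the token lengths (running prefix sums).
def pvAccum (acc : Int) : List Int → List Int
  | [] => []
  | x :: xs => (acc + x) :: pvAccum (acc + x) xs

def tokens_to_big_tokens_alt (tokens : List String) (str_len_cap : Int) (reverse : Bool) : List String :=
  let total := (tokens.map PySem.Str.len).sum
  if str_len_cap < 0 ∨ str_len_cap ≥ total then
    [PySem.Str.join "" (if reverse then tokens.reverse else tokens)]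
  else
    let pref := pvAccum 0 (tokens.map PySem.Str.len)
    -- bisect_right on the sorted (nondecreasing) prefix list = number of entries ≤ cap
    let k := (pref.takeWhile (fun p => decide (p ≤ str_len_cap))).length
    let full_len := if k = 0 then 0 else pref.getD (k - 1) 0  -- prefix[k-1] if k else 0 (in range: k ≤ len)
    let rem := str_len_cap - full_len
    let tok := tokens.getD k ""                                 -- tokens[k], in range: k < len(tokens)
    if reverse then
      [ PySem.Str.slice tok (some (PySem.Str.len tok - rem)) none,
        PySem.Str.join "" ((tokens.take k).reverse) ]
    else
      [ PySem.Str.join "" (tokens.take k),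
        PySem.Str.slice tok none (some rem) ]

-- ===== PRECONDITION & SPEC =====
def Spec_tokens_to_big_tokens (tokens : List String) (str_len_cap : Int) (reverse : Bool) (out : List String) : Prop := out = tokens_to_big_tokens_alt tokens str_len_cap reverse
instance (tokens : List String) (str_len_cap : Int) (reverse : Bool) (out : List String) : Decidable (Spec_tokens_to_big_tokens tokens str_len_cap reverse out) := by unfold Spec_tokens_to_big_tokens; infer_instance

-- ===== CLAIM (what is proved, stated in full; the proofs are below) =====
def Claim_equal_tokens_to_big_tokens : Prop := ∀ (tokens : List String) (str_len_cap : Int) (reverse : Bool), Dom_tokens_to_big_tokens tokens str_len_cap reverse → Spec_tokens_to_big_tokens tokens str_len_cap reverse (tokens_to_big_tokens tokens str_len_cap reverse)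

-- ===== LEMMAS AND PROOFS =====

lemma pv_foldl_len (tokens : List String) (a : Int) :
    tokens.foldl (fun a t => a + PySem.Str.len t) a = a + (tokens.map PySem.Str.len).sum := by
  induction tokens generalizing a with
  | nil => simp
  | cons t rest ih =>
    rw [List.foldl_cons, ih, List.map_cons, List.sum_cons]; ring

lemma pvALoop_eq (cap : Int) (toks : List String) (i : Nat) (s : Int)
    (h1 : s ≤ cap) (h2 : cap < s + (toks.map PySem.Str.len).sum) :
    pvALoop cap toks i s =
      ((i + ((pvAccum s (toks.map PySem.Str.len)).takeWhile (fun p => decide (p ≤ cap))).length),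
       toks.getD (((pvAccum s (toks.map PySem.Str.len)).takeWhile (fun p => decide (p ≤ cap))).length) "",
       (if ((pvAccum s (toks.map PySem.Str.len)).takeWhile (fun p => decide (p ≤ cap))).length = 0 then s
        else (pvAccum s (toks.map PySem.Str.len)).getD
          (((pvAccum s (toks.map PySem.Str.len)).takeWhile (fun p => decide (p ≤ cap))).length - 1) 0)) := by
  induction toks generalizing i s with
  | nil => simp at h2; omega
  | cons t rest ih =>
    simp only [List.map_cons, List.sum_cons, PySem.Str.len_eq] at h2
    simp only [List.map_cons, pvAccum, pvALoop, PySem.Str.len_eq]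
    by_cases hb : s + (t.toList.length : Int) > cap
    · rw [if_pos hb, List.takeWhile_cons_of_neg (by simpa using hb)]
      simp
    · rw [if_neg hb, List.takeWhile_cons_of_pos (by simpa using not_lt.mp hb)]
      have ih' := ih (i + 1) (s + (t.toList.length : Int)) (not_lt.mp hb) (by omega)
      rw [ih']
      simp only [List.length_cons]
      generalize ((pvAccum (s + (t.toList.length : Int)) (rest.map PySem.Str.len)).takeWhile
          (fun p => decide (p ≤ cap))).length = k
      refine Prod.ext (by simp; omega) (Prod.ext (by simp) ?_)
      cases k with
      | zero => simp
      | succ m => simp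

-- Str.slice equalities go through toList (String.toList is injective).
lemma pv_str_ext {s t : String} (h : s.toList = t.toList) : s = t := by
  exact String.toList_inj.mp h

lemma pv_bisect_facts (cap : Int) (toks : List String) (s : Int)
    (h1 : s ≤ cap) (h2 : cap < s + (toks.map PySem.Str.len).sum) :
    (((pvAccum s (toks.map PySem.Str.len)).takeWhile (fun p => decide (p ≤ cap))).length < toks.length)
    ∧ (if ((pvAccum s (toks.map PySem.Str.len)).takeWhile (fun p => decide (p ≤ cap))).length = 0 then s
        else (pvAccum s (toks.map PySem.Str.len)).getD
          (((pvAccum s (toks.map PySem.Str.len)).takeWhile (fun p => decide (p ≤ cap))).length - 1) 0) ≤ cap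
    ∧ cap < (if ((pvAccum s (toks.map PySem.Str.len)).takeWhile (fun p => decide (p ≤ cap))).length = 0 then s
        else (pvAccum s (toks.map PySem.Str.len)).getD
          (((pvAccum s (toks.map PySem.Str.len)).takeWhile (fun p => decide (p ≤ cap))).length - 1) 0)
        + PySem.Str.len (toks.getD
            (((pvAccum s (toks.map PySem.Str.len)).takeWhile (fun p => decide (p ≤ cap))).length) "") := by
  induction toks generalizing s with
  | nil => simp at h2; omega
  | cons t rest ih =>
    simp only [List.map_cons, List.sum_cons, PySem.Str.len_eq] at h2
    simp only [List.map_cons, pvAccum]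
    by_cases hb : s + (t.toList.length : Int) > cap
    · rw [List.takeWhile_cons_of_neg (by simpa using hb)]
      simpa [PySem.Str.len_eq] using ⟨h1, hb⟩
    · rw [List.takeWhile_cons_of_pos (by simpa using not_lt.mp hb)]
      have ih' := ih (s + (t.toList.length : Int)) (not_lt.mp hb) (by omega)
      simp only [PySem.Str.len_eq] at ih' ⊢
      obtain ⟨ih1, ih2, ih3⟩ := ih'
      simp only [List.length_cons]
      generalize hgen : ((pvAccum (s + (t.toList.length : Int)) (rest.map PySem.Str.len)).takeWhile
          (fun p => decide (p ≤ cap))).length = k at ih1 ih2 ih3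
      refine ⟨by omega, ?_, ?_⟩
      · cases k with
        | zero => simpa using not_lt.mp hb
        | succ m => simpa using ih2
      · cases k with
        | zero => simpa using ih3
        | succ m => simpa using ih3

-- ===== VERDICT (by name: the statement is the Claim_ definition above) =====
theorem tokens_to_big_tokens_spec : Claim_equal_tokens_to_big_tokens := by
  intro tokens cap rev _
  unfold Spec_tokens_to_big_tokens tokens_to_big_tokens tokens_to_big_tokens_alt
  rw [pv_foldl_len]
  simp only [zero_add]
  by_cases hg : cap < 0 ∨ cap ≥ (tokens.map PySem.Str.len).sum
  · rw [if_pos hg, if_pos hg]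
  · rw [if_neg hg, if_neg hg]
    push Not at hg
    obtain ⟨h0, hlt⟩ := hg
    rw [pvALoop_eq cap tokens 0 0 h0 (by omega)]
    have hf := pv_bisect_facts cap tokens 0 h0 (by omega)
    dsimp only at hf ⊢
    simp only [Nat.zero_add]
    obtain ⟨hklen, hfull_le, hbreak⟩ := hf
    set k := ((pvAccum 0 (tokens.map PySem.Str.len)).takeWhile (fun p => decide (p ≤ cap))).length with hk
    set full := (if k = 0 then (0:Int) else (pvAccum 0 (tokens.map PySem.Str.len)).getD (k - 1) 0) with hfull
    set tok := tokens.getD k "" with htok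
    cases rev with
    | false =>
      simp only [Bool.false_eq_true, if_false]
    | true =>
      simp only [if_true]
      congr 1
      simp only [PySem.Str.len_eq] at hbreak ⊢
      by_cases hfc : full < cap
      · rw [if_pos hfc]
        set r : Nat := (cap - full).toNat with hr
        have hr0 : 0 < r := by omega
        have hrlen : r ≤ tok.toList.length := by omega
        apply pv_str_ext
        rw [PySem.Str.toList_slice, PySem.Str.toList_slice,
            PySem.Chars.slice_eq_listSlice, PySem.Chars.slice_eq_listSlice]
        have e1 : full - cap = -(r : Int) := by omega
        have e2 : (tok.toList.length : Int) - (cap - full) = ((tok.toList.length - r : Nat) : Int) := by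
          omega
        rw [e1, e2, PySem.List.slice_from_natCast,
            PySem.List.slice_some_none, PySem.List.clampIdx_neg_natCast _ r hr0]
      · rw [if_neg hfc]
        have hfe : cap - full = 0 := by omega
        apply pv_str_ext
        rw [PySem.Str.toList_slice, PySem.Chars.slice_eq_listSlice, hfe, sub_zero,
            PySem.List.slice_from_natCast]
        simp
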